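-- pv_equiv track=rewrite | github.com/LanceSebastian/Advent-of-Code-2023 | Day_4/AoC_Day_4_Part2.py | calculateCardsGenerated
-- ===== SOURCE A (Python) =====
-- def calculateCardsGenerated(win_array):
--     card_generation_array = []
--
--     for card in win_array[::-1]:
--         total_cards = 0
--         new_cards = []
--
--         for index, cards_generated in enumerate(card_generation_array[::-1]):
--             if index >= card : break
--             new_cards.append(cards_generated)
--
--         total_cards = 1 + sum(new_cards)
--         card_generation_array.append(total_cards)
--
--     return card_generation_array
-- ===== SOURCE B (Python) =====
-- def calculateCardsGenerated(win_array):
--     out = []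
--     prefix = [0]  # prefix[i] == sum(out[:i])
--     for card in reversed(win_array):
--         n = len(out)
--         k = min(max(card, 0), n)  # clamped window length
--         total = 1 + prefix[n] - prefix[n - k]
--         out.append(total)
--         prefix.append(prefix[n] + total)
--     return out
-- ===== Notes on version B (the rewrite author's own statement) =====
-- stated objective: faster
-- what changed: Replaces the inner reversed scan over the accumulated totals with a running prefix-sum array, so each card's window sum is an O(1) subtraction with a clamped window length.
import Mathlib
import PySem

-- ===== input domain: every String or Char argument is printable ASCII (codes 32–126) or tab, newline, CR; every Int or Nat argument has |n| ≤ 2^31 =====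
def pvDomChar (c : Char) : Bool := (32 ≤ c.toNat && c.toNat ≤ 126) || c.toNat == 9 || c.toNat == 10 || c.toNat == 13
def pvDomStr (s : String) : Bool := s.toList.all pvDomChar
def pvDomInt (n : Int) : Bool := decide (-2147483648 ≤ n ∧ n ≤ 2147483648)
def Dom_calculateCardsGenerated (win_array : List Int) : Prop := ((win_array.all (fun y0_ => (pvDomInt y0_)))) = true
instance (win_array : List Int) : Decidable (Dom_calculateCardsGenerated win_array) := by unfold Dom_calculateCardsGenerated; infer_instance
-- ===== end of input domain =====

-- B replaces A's quadratic inner reversed scan with a running prefix-sum list: O(n) instead of O(n^2).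

-- ===== PORT A =====
-- inner loop: 'for index, cards_generated in enumerate(card_generation_array[::-1]): if index >= card: break; new_cards.append(...)'
def pvInnerA (card : Int) : List Int → Int → List Int
  | [], _ => []
  | x :: xs, i => if i ≥ card then [] else x :: pvInnerA card xs (i + 1)

def calculateCardsGenerated (win_array : List Int) : List Int :=
  win_array.reverse.foldl
    (fun card_generation_array card =>
      let new_cards := pvInnerA card card_generation_array.reverse 0
      let total_cards := 1 + new_cards.sum
      card_generation_array ++ [total_cards])
    []

-- ===== PORT B =====
def pvAltStep (st : List Int × List Int) (card : Int) : List Int × List Int :=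
  let n := st.1.length
  let k := (min (max card 0) (n : Int)).toNat
  let total := 1 + st.2.getD n 0 - st.2.getD (n - k) 0
  (st.1 ++ [total], st.2 ++ [st.2.getD n 0 + total])

def calculateCardsGenerated_alt (win_array : List Int) : List Int :=
  (win_array.reverse.foldl pvAltStep ([], [0])).1

-- ===== PRECONDITION & SPEC =====
def Spec_calculateCardsGenerated (win_array : List Int) (out : List Int) : Prop := out = calculateCardsGenerated_alt win_array
instance (win_array : List Int) (out : List Int) : Decidable (Spec_calculateCardsGenerated win_array out) := by unfold Spec_calculateCardsGenerated; infer_instance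

-- ===== CLAIM (what is proved, stated in full; the proofs are below) =====
def Claim_equal_calculateCardsGenerated : Prop := ∀ (win_array : List Int), Dom_calculateCardsGenerated win_array → Spec_calculateCardsGenerated win_array (calculateCardsGenerated win_array)

-- ===== LEMMAS AND PROOFS =====

-- prefix-sum list of a list: pfxOf l = [sum l[:0], sum l[:1], …, sum l]
def pfxOf (l : List Int) : List Int :=
  (List.range (l.length + 1)).map (fun i => (l.take i).sum)

theorem pvInnerA_eq_take (card : Int) (xs : List Int) (i : Int) :
    pvInnerA card xs i = xs.take (card - i).toNat := by
  induction xs generalizing i with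
  | nil => simp [pvInnerA]
  | cons x xs ih =>
    by_cases h : i ≥ card
    · have : (card - i).toNat = 0 := by omega
      simp [pvInnerA, h, this]
    · have h1 : (card - i).toNat = (card - (i + 1)).toNat + 1 := by omega
      simp [pvInnerA, h, h1, ih]

theorem pfxOf_getD (l : List Int) (i : Nat) (hi : i ≤ l.length) :
    (pfxOf l).getD i 0 = (l.take i).sum := by
  have hlen : i < (List.range (l.length + 1)).length := by simpa using by omega
  simp [pfxOf, List.getD, List.getElem?_map, List.getElem?_range (by omega : i < l.length + 1)]

theorem pfxOf_append (l : List Int) (t : Int) :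
    pfxOf (l ++ [t]) = pfxOf l ++ [l.sum + t] := by
  simp only [pfxOf, List.length_append, List.length_cons, List.length_nil]
  rw [show l.length + 1 + 1 = (l.length + 1) + 1 from rfl, List.range_succ, List.map_append]
  congr 1
  · apply List.map_congr_left
    intro i hi
    have hi' : i ≤ l.length := by simpa [List.mem_range] using Nat.lt_succ_iff.mp (List.mem_range.mp hi)
    rw [List.take_append_of_le_length hi']
  · simp

theorem sum_take_reverse (l : List Int) (k : Nat) :
    (l.reverse.take k).sum = l.sum - (l.take (l.length - k)).sum := by
  rw [List.take_reverse, List.sum_reverse]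
  have := List.sum_take_add_sum_drop l (l.length - k)
  omega

-- the loop invariant: B's fold carries A's list together with its prefix sums
theorem fold_invariant (l : List Int) (acc : List Int) :
    l.foldl pvAltStep (acc, pfxOf acc) =
      (l.foldl (fun a card => a ++ [1 + (pvInnerA card a.reverse 0).sum]) acc,
       pfxOf (l.foldl (fun a card => a ++ [1 + (pvInnerA card a.reverse 0).sum]) acc)) := by
  induction l generalizing acc with
  | nil => rfl
  | cons card l ih =>
    have hstep : pvAltStep (acc, pfxOf acc) card =
        (acc ++ [1 + (pvInnerA card acc.reverse 0).sum],
         pfxOf (acc ++ [1 + (pvInnerA card acc.reverse 0).sum])) := by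
      have hn : acc.length ≤ acc.length := le_refl _
      have hk : (min (max card 0) (acc.length : Int)).toNat ≤ acc.length := by omega
      have htot : (1 : Int) + (pfxOf acc).getD acc.length 0
            - (pfxOf acc).getD (acc.length - (min (max card 0) (acc.length : Int)).toNat) 0
          = 1 + (pvInnerA card acc.reverse 0).sum := by
        rw [pfxOf_getD acc acc.length hn, pfxOf_getD acc _ (by omega),
            pvInnerA_eq_take, sum_take_reverse]
        have h1 : acc.length - card.toNat
            = acc.length - (min (max card 0) (acc.length : Int)).toNat := by omega
        have h2 : (acc.take acc.length).sum = acc.sum := by simp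
        rw [Int.sub_zero, h2, h1]
        ring
      simp only [pvAltStep]
      refine Prod.ext ?_ ?_
      · simpa using congrArg (fun t => acc ++ [t]) htot
      · show pfxOf acc ++ [(pfxOf acc).getD acc.length 0 + _] = _
        rw [pfxOf_append, htot, pfxOf_getD acc acc.length hn]
        simp
    rw [List.foldl_cons, hstep, ih, List.foldl_cons]

-- ===== VERDICT (by name: the statement is the Claim_ definition above) =====
theorem calculateCardsGenerated_spec : Claim_equal_calculateCardsGenerated := by
  intro win_array _
  unfold Spec_calculateCardsGenerated calculateCardsGenerated calculateCardsGenerated_alt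
  have h0 : pfxOf [] = [0] := rfl
  rw [← h0, fold_invariant]
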